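-- pv_equiv track=rewrite | github.com/Oxicid/UniV | utils/other.py | true_groupby
-- ===== SOURCE A (Python) =====
-- def true_groupby(seq):
--     """Groups and returns only identical elements"""
--     seq = seq.copy()
--     sorted_groups = []
--     while True:
--         if len(seq) <= 1:
--             break
--
--         tar_val = seq.pop()
--         groups = []
--         for i in range(len(seq) - 1, -1, -1):
--             v = seq[i]
--             if v == tar_val:
--                 groups.append(v)
--                 seq.pop(i)
--         if groups:
--             groups.append(tar_val)
--             sorted_groups.append(groups)
--
--     return sorted_groups
-- ===== SOURCE B (Python) =====
-- def true_groupby(seq):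
--     """Groups and returns only identical elements"""
--     groups = {}
--     for v in reversed(seq):
--         groups.setdefault(v, []).append(v)
--     return [g for g in groups.values() if len(g) > 1]
-- ===== Notes on version B (the rewrite author's own statement) =====
-- stated objective: faster
-- what changed: Replaces A's repeated pop-and-rescan passes over a mutated copy (quadratic) with a single reversed pass that buckets values in a dict via setdefault, then keeps buckets of size > 1.
import Mathlib
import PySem

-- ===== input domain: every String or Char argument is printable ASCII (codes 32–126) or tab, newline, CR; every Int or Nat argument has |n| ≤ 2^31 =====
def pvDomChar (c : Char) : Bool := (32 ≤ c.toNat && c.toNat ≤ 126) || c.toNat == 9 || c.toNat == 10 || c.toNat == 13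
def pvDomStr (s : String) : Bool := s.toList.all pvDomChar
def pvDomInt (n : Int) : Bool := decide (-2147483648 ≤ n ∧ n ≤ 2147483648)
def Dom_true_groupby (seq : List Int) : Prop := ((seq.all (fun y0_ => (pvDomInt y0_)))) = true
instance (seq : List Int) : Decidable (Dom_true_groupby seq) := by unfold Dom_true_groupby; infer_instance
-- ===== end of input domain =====

-- B replaces A's quadratic pop-and-rescan passes with one reversed pass bucketing into a dict (faster).

-- ===== PORT A =====
-- inner loop 'for i in range(len(seq)-1, -1, -1): v = seq[i]; if v == tar_val: groups.append(v); seq.pop(i)'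
-- (descending index with pop at i never shifts the not-yet-visited smaller indices, so it is structural
-- on the list; returns (seq after the pops, groups in append order))
def pvScanPop (tar : Int) : List Int → List Int × List Int
  | [] => ([], [])
  | x :: xs =>
      let r := pvScanPop tar xs
      if x == tar then (r.1, r.2 ++ [x]) else (x :: r.1, r.2)

theorem pvScanPop_fst_length (tar : Int) (xs : List Int) :
    (pvScanPop tar xs).1.length ≤ xs.length := by
  induction xs with
  | nil => simp [pvScanPop]
  | cons x xs ih =>
      simp only [pvScanPop]
      split <;> simp <;> omega

-- the 'while True' loop with accumulator sorted_groups; 'seq.pop()' is PySem.List.pop? seq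
def pvWhileLoop (seq : List Int) (sortedGroups : List (List Int)) : List (List Int) :=
  if seq.length ≤ 1 then sortedGroups
  else
    match hp : PySem.List.pop? seq with
    | none => sortedGroups   -- unreachable: seq is nonempty here
    | some (tar, rest) =>
        let r := pvScanPop tar rest
        pvWhileLoop r.1
          (if r.2 ≠ [] then sortedGroups ++ [r.2 ++ [tar]] else sortedGroups)
  termination_by seq.length
  decreasing_by
    have h1 : rest.length + 1 = seq.length := PySem.List.length_of_pop?_eq_some seq hp
    have h2 := pvScanPop_fst_length tar rest
    omega

def true_groupby (seq : List Int) : List (List Int) :=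
  -- 'seq = seq.copy()' only protects the caller's list; the result is computed from the same elements
  pvWhileLoop seq []

-- ===== PORT B =====
def true_groupby_alt (seq : List Int) : List (List Int) :=
  let d := seq.reverse.foldl
    (fun d v => d.modify v [] (fun g => g ++ [v])) PySem.Dict.empty
  d.values.filter (fun g => decide (1 < g.length))

-- ===== PRECONDITION & SPEC =====
def Spec_true_groupby (seq : List Int) (out : List (List Int)) : Prop := out = true_groupby_alt seq
instance (seq : List Int) (out : List (List Int)) : Decidable (Spec_true_groupby seq out) := by unfold Spec_true_groupby; infer_instance

-- ===== CLAIM (what is proved, stated in full; the proofs are below) =====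
def Claim_equal_true_groupby : Prop := ∀ (seq : List Int), Dom_true_groupby seq → Spec_true_groupby seq (true_groupby seq)

-- ===== LEMMAS AND PROOFS =====

-- canonical form both programs reduce to, phrased on r = seq.reverse (fuelled: fuel ≥ length suffices)
def pvGF : Nat → List Int → List (List Int)
  | _, [] => []
  | 0, _ :: _ => []
  | n+1, v :: rest =>
      if 0 < rest.count v then
        (List.replicate (rest.count v) v ++ [v]) :: pvGF n (rest.filter (fun x => x ≠ v))
      else pvGF n (rest.filter (fun x => x ≠ v))

theorem pvGF_nil (n : Nat) : pvGF n [] = [] := by cases n <;> rfl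

theorem pvGF_congr (n : Nat) : ∀ (m : Nat) (r : List Int), r.length ≤ n → r.length ≤ m →
    pvGF n r = pvGF m r := by
  induction n with
  | zero =>
      intro m r hn _
      have : r = [] := by cases r <;> simp_all
      subst this; simp [pvGF_nil]
  | succ n ih =>
      intro m r hn hm
      match r, m with
      | [], _ => simp [pvGF_nil]
      | _ :: _, 0 => simp at hm
      | v :: rest, m + 1 =>
          simp only [pvGF]
          have hf := List.length_filter_le (fun x => decide (x ≠ v)) rest
          simp only [List.length_cons, Nat.add_le_add_iff_right] at hn hm
          rw [ih m (rest.filter (fun x => x ≠ v)) (by omega) (by omega)]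

def pvG (r : List Int) : List (List Int) := pvGF r.length r

theorem pvG_cons (v : Int) (rest : List Int) :
    pvG (v :: rest) =
      if 0 < rest.count v then
        (List.replicate (rest.count v) v ++ [v]) :: pvG (rest.filter (fun x => x ≠ v))
      else pvG (rest.filter (fun x => x ≠ v)) := by
  show pvGF (rest.length + 1) (v :: rest) = _
  simp only [pvGF]
  have hf := List.length_filter_le (fun x => decide (x ≠ v)) rest
  rw [pvGF_congr rest.length (rest.filter (fun x => x ≠ v)).length _ (by omega) (le_refl _)]
  rfl

theorem pvScanPop_eq (tar : Int) (xs : List Int) :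
    pvScanPop tar xs = (xs.filter (fun x => x ≠ tar), List.replicate (xs.count tar) tar) := by
  induction xs with
  | nil => simp [pvScanPop]
  | cons x xs ih =>
      by_cases h : x = tar <;>
        simp [pvScanPop, ih, h, List.replicate_succ']

theorem pvWhileLoop_eq (n : Nat) : ∀ (seq : List Int) (acc : List (List Int)), seq.length ≤ n →
    pvWhileLoop seq acc = acc ++ pvG seq.reverse := by
  induction n with
  | zero =>
      intro seq acc hn
      have : seq = [] := by cases seq <;> simp_all
      subst this
      rw [pvWhileLoop.eq_def]
      simp [pvG, pvGF]
  | succ n ih =>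
      intro seq acc hn
      by_cases h1 : seq.length ≤ 1
      · rw [pvWhileLoop.eq_def, if_pos h1]
        match seq, h1 with
        | [], _ => simp [pvG, pvGF]
        | [x], _ => simp [pvG, pvGF]
      · rw [pvWhileLoop.eq_def, if_neg h1]
        obtain ⟨rest, t, hrev⟩ : ∃ rest t, seq = rest ++ [t] := by
          rcases List.eq_nil_or_concat seq with h | ⟨rest, t, h⟩
          · subst h; simp at h1
          · exact ⟨rest, t, by simpa using h⟩
        subst hrev
        have hpop : PySem.List.pop? (rest ++ [t]) = some (t, rest) :=
          PySem.List.pop?_last rest t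
        simp only [pvScanPop_eq]
        have hrest : rest.length ≤ n := by
          simp only [List.length_append, List.length_cons] at hn; simp at hn; omega
        split
        next heq => rw [hpop] at heq; simp at heq
        next tar rest1 heq =>
        rw [hpop] at heq
        obtain ⟨rfl, rfl⟩ : t = tar ∧ rest = rest1 := by simpa using heq
        rw [ih _ _ (le_trans (List.length_filter_le _ _) hrest)]
        have hgrev : (rest ++ [t]).reverse = t :: rest.reverse := by simp
        rw [hgrev, pvG_cons]
        by_cases hc : 0 < rest.count t
        · have hcr : 0 < rest.reverse.count t := by rw [List.count_reverse]; exact hc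
          have hne2 : List.replicate (rest.count t) t ≠ ([] : List Int) := by
            simp; omega
          rw [if_pos hne2, if_pos hcr]
          simp [List.count_reverse, List.append_assoc]
        · have hz : rest.count t = 0 := by omega
          have hcr : ¬ 0 < rest.reverse.count t := by rw [List.count_reverse]; omega
          rw [if_neg hcr]
          simp [hz]

theorem pvA_eq_G (seq : List Int) : true_groupby seq = pvG seq.reverse := by
  simpa [true_groupby] using pvWhileLoop_eq seq.length seq [] (le_refl _)

-- ---- B side ----

theorem pvFold_getD (r : List Int) (d : PySem.Dict Int (List Int)) (c : Int) :
    (r.foldl (fun d v => d.modify v [] (fun g => g ++ [v])) d).getD c []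
      = d.getD c [] ++ List.replicate (r.count c) c := by
  have h := PySem.Dict.getD_foldl_modify_append (r.map (fun v => (v, v))) d c
  rw [List.foldl_map] at h
  rw [h, List.filter_map, List.map_map]
  congr 1
  have hcomp : (fun p : Int × Int => p.1 == c) ∘ (fun v : Int => (v, v)) = (fun v => v == c) := rfl
  rw [hcomp, List.filter_beq]
  simp

theorem pvFold_keys (r : List Int) :
    (r.foldl (fun d v => d.modify v [] (fun g => g ++ [v])) PySem.Dict.empty).keys
      = PySem.Set.ofList r := by
  have h := PySem.Dict.keys_foldl_modify r ([] : List Int)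
    (fun (_ : PySem.Dict Int (List Int)) (v : Int) (g : List Int) => g ++ [v]) PySem.Dict.empty
  rw [h, PySem.Dict.keys_empty, PySem.Set.ofList_eq_foldl]
  rfl

theorem pvFold_nodup (r : List Int) :
    (r.foldl (fun d v => d.modify v [] (fun g => g ++ [v])) PySem.Dict.empty).keys.Nodup := by
  rw [pvFold_keys]
  exact PySem.Set.nodup_ofList r

-- values of a nodup-key dict, read off through getD
theorem pvValues_eq (d : PySem.Dict Int (List Int)) (h : d.keys.Nodup) :
    d.values = d.keys.map (fun k => d.getD k []) := by
  have h2 : ∀ p ∈ d.items, p.2 = d.getD p.1 [] := by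
    rintro ⟨k, v⟩ hp
    exact (PySem.Dict.getD_of_mem_items d hp h []).symm
  calc d.values = d.items.map (fun p => p.2) := rfl
    _ = d.items.map (fun p => d.getD p.1 []) := List.map_congr_left h2
    _ = d.keys.map (fun k => d.getD k []) := by
        rw [show d.keys = d.items.map (fun p => p.1) from rfl, List.map_map]
        rfl

theorem pvB_values (seq : List Int) :
    true_groupby_alt seq
      = ((PySem.Set.ofList seq.reverse).map
          (fun k => List.replicate (seq.reverse.count k) k)).filter
          (fun g => decide (1 < g.length)) := by
  have hdef : true_groupby_alt seq
      = ((seq.reverse.foldl (fun d v => d.modify v [] (fun g => g ++ [v]))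
          PySem.Dict.empty).values).filter (fun g => decide (1 < g.length)) := rfl
  rw [hdef, pvValues_eq _ (pvFold_nodup seq.reverse), pvFold_keys]
  refine congrArg (List.filter _) (List.map_congr_left ?_)
  intro k _
  rw [pvFold_getD]
  simp [PySem.Dict.getD_empty]

-- adding to a set whose head is not in the tail keeps the head in front
theorem pvUpdate_cons (l : List Int) : ∀ (s : PySem.Set Int) (v : Int), (∀ x ∈ l, x ≠ v) →
    PySem.Set.update (v :: s) l = v :: PySem.Set.update s l := by
  induction l with
  | nil => intro s v _; rfl
  | cons x l ih =>
      intro s v hv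
      have hx : x ≠ v := hv x (by simp)
      have : PySem.Set.add (v :: s) x = v :: PySem.Set.add s x := by
        simp only [PySem.Set.add, PySem.Set.contains, List.contains_cons]
        have : (x == v) = false := by simp [hx]
        rw [this]
        simp only [Bool.false_or]
        split <;> simp
      simp only [PySem.Set.update, List.foldl_cons] at *
      rw [this, ih _ _ (fun y hy => hv y (by simp [hy]))]

-- ofList removes duplicates of the head together with the head
theorem pvUpdate_filter (r : List Int) : ∀ (s : PySem.Set Int) (v : Int), v ∈ s →
    PySem.Set.update s r = PySem.Set.update s (r.filter (fun x => x ≠ v)) := by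
  induction r with
  | nil => intro s v _; rfl
  | cons x r ih =>
      intro s v hv
      by_cases h : x = v
      · subst h
        have hfilt : List.filter (fun y => y ≠ x) (x :: r) = List.filter (fun y => y ≠ x) r := by
          simp
        rw [hfilt]
        have hadd : PySem.Set.add s x = s := by
          simp only [PySem.Set.add, PySem.Set.contains]
          rw [if_pos (by simpa using hv)]
        calc PySem.Set.update s (x :: r) = PySem.Set.update (PySem.Set.add s x) r := rfl
          _ = PySem.Set.update s r := by rw [hadd]
          _ = PySem.Set.update s (r.filter (fun y => y ≠ x)) := ih s x hv
      · have hfilt : List.filter (fun y => y ≠ v) (x :: r) = x :: List.filter (fun y => y ≠ v) r := by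
          simp [h]
        rw [hfilt]
        have hmem : v ∈ PySem.Set.add s x := by
          simp only [PySem.Set.add]
          split
          · exact hv
          · exact List.mem_append_left _ hv
        calc PySem.Set.update s (x :: r) = PySem.Set.update (PySem.Set.add s x) r := rfl
          _ = PySem.Set.update (PySem.Set.add s x) (r.filter (fun y => y ≠ v)) := ih _ v hmem
          _ = PySem.Set.update s (x :: r.filter (fun y => y ≠ v)) := rfl

theorem pvOfList_cons (v : Int) (rest : List Int) :
    PySem.Set.ofList (v :: rest) = v :: PySem.Set.ofList (rest.filter (fun x => x ≠ v)) := by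
  have hadd : PySem.Set.add ([] : PySem.Set Int) v = [v] := rfl
  rw [PySem.Set.ofList_eq_foldl, List.foldl_cons, hadd]
  show PySem.Set.update [v] rest = _
  rw [pvUpdate_filter rest [v] v (by simp)]
  have hnov : ∀ x ∈ rest.filter (fun x => x ≠ v), x ≠ v := by
    intro x hx
    simpa using List.of_mem_filter hx
  rw [show ([v] : PySem.Set Int) = v :: ([] : PySem.Set Int) from rfl,
      pvUpdate_cons _ _ _ hnov]
  rw [PySem.Set.ofList_eq_foldl]
  rfl

theorem pvB_eq_G (n : Nat) : ∀ (r : List Int), r.length ≤ n →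
    ((PySem.Set.ofList r).map (fun k => List.replicate (r.count k) k)).filter
        (fun g => decide (1 < g.length)) = pvG r := by
  induction n with
  | zero =>
      intro r hn
      have : r = [] := by cases r <;> simp_all
      subst this; simp [pvG, pvGF, PySem.Set.ofList_eq_foldl]
  | succ n ih =>
      intro r hn
      match r with
      | [] => simp [pvG, pvGF, PySem.Set.ofList_eq_foldl]
      | v :: rest =>
          rw [pvOfList_cons, pvG_cons]
          have hlen : (rest.filter (fun x => x ≠ v)).length ≤ n := by
            have := List.length_filter_le (fun x => decide (x ≠ v)) rest
            simp only [List.length_cons, Nat.add_le_add_iff_right] at hn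
            omega
          have hcnt : ∀ k ∈ PySem.Set.ofList (rest.filter (fun x => x ≠ v)),
              (v :: rest).count k = (rest.filter (fun x => x ≠ v)).count k := by
            intro k hk
            have hk2 : k ∈ rest.filter (fun x => x ≠ v) :=
              (PySem.Set.mem_ofList _ _).1 hk
            have hkv : k ≠ v := by simpa using List.of_mem_filter hk2
            simp [List.count_filter, hkv, Ne.symm hkv]
          have htail :
              ((PySem.Set.ofList (rest.filter (fun x => x ≠ v))).map
                (fun k => List.replicate ((v :: rest).count k) k)).filter
                (fun g => decide (1 < g.length))
              = pvG (rest.filter (fun x => x ≠ v)) := by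
            rw [List.map_congr_left (fun k hk => by rw [hcnt k hk])]
            exact ih _ hlen
          by_cases hc : 0 < rest.count v
          · rw [if_pos hc]
            have hvc : (v :: rest).count v = rest.count v + 1 := by simp
            have h2 : 1 < rest.count v + 1 := by omega
            simp only [List.map_cons, List.filter_cons, hvc, List.length_replicate, h2,
              decide_true, if_true]
            rw [htail, List.replicate_succ']
          · rw [if_neg hc]
            have hvc : (v :: rest).count v = 1 := by simp; omega
            simp only [List.map_cons, List.filter_cons, hvc]
            simpa using htail

-- ===== VERDICT (by name: the statement is the Claim_ definition above) =====
theorem true_groupby_spec : Claim_equal_true_groupby := by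
  intro seq _
  show true_groupby seq = true_groupby_alt seq
  rw [pvA_eq_G, pvB_values, pvB_eq_G seq.reverse.length seq.reverse (le_refl _)]
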